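/- GENERATED by tools/from_farm_form.py from prooffarm-gif/accepted/DGifGetExtensionNext.2/Proof.lean (a worked proof of the farm's unit `DGifGetExtensionNext.2`,
   accepted by the verdict) — do not edit. -/
import Gif.Spec.Units.DGifGetExtensionNext_2
import Gif.Spec.AllSegs
import Gif.Spec.Proved.DGifGetExtensionNext_2_Lemmas

open X86 X86.User Asan ProgX.Base ProgX.Base.Spec Gif.Spec

/-!
  `DGifGetExtensionNext.2` (0x1098c3 … 0x109947, 31 instructions; dgif_lib.c:609-623): the body segment behind the length byte.
  The return address 0x10991d (`ret7`) of the second `InternalRead` is not a cut of the design, so the unit makes it one of its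
  own: the private assertion `en2_AtRet7` and two walks (Lemmas.lean), chained here.
-/

/-- Segment 2 of `DGifGetExtensionNext` takes `AfterLen` at 0x1098c3 to `Done` at 0x1098a6. -/
theorem Gif.Spec.Proved.DGifGetExtensionNext_2_ok : Gif.Spec.DGifGetExtensionNext_2.Statement := by
  intro Lay hLay μ hμ u₀ hcode h_InternalRead h_asan_store8_noabort h_asan_store1_noabort h_asan_store4_noabort
  intro H rest frames F R e ret v hat
  -- the callee's contract for the frame list of the body (the own frame in front) and the request of `Buf` bytes, the byte
  -- that the first read left in the frame
  have hir := h_InternalRead H rest (DGifGetExtensionNext.framesIn frames e) F R (v.mem.readLE (e.reg .rsp - 88) 1)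
  -- 0x1098c3 … 0x1098a6 (the terminator), or … the call … 0x10991d
  refine (Gif.Spec.DGifGetExtensionNext_2.en2_seg_head Lay hLay μ hμ u₀ hcode H rest frames F R e ret _ hir
    h_asan_store8_noabort h_asan_store1_noabort v hat rfl).trans ?_
  intro v1 hv1
  rcases hv1 with hdone | hret7
  · -- the terminator arm is at the exit already
    exact ReachVia.done hdone
  · -- 0x10991d … 0x1098a6
    exact Gif.Spec.DGifGetExtensionNext_2.en2_seg_tail Lay hLay μ hμ u₀ hcode H rest frames F R e ret
      h_asan_store4_noabort v1 hret7
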